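-- pv_equiv track=rewrite | github.com/lemon24/linesieve | src/linesieve/paths.py | shorten_paths
-- ===== SOURCE A (Python) =====
-- def shorten_paths(paths, sep, ellipsis):
--     shortened = {path: path.split(sep) for path in paths}
--
--     _do_end(shortened.values(), 0, -1)
--
--     for original, mask in shortened.items():
--
--         path = []
--         for ps, ms in zip(original.split(sep), mask):
--
--             if ms is None:
--                 path.append(ps)
--             else:
--                 if not path or path[-1] != ellipsis:
--                     path.append(ellipsis)
--
--         shortened[original] = sep.join(path)
--
--     return shortened
--
-- def _do_end(paths, start, end):
--     groups = {}
--     for path in paths: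
--         groups.setdefault(path[end], []).append(path)
--
--     for group in groups.values():
--         for path in group:
--             path[end] = None
--
--         if len(group) == 1:
--             continue
--
--         _do_start(group, start, end - 1)
--
-- def _do_start(paths, start, end):
--     groups = {}
--     for path in paths:
--         groups.setdefault(path[start], []).append(path)
--
--     for group in groups.values():
--         if len(groups) > 1:
--             for path in group:
--                 path[start] = None
--
--         if len(group) == 1:
--             continue
--
--         _do_end(group, start + 1, end)
-- ===== SOURCE B (Python) =====
-- def shorten_paths(paths, sep, ellipsis):
--     # iterative driver: explicit LIFO work stack replaces the mutual recursion
--     order = []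
--     masks = {}
--     for path in paths:
--         if path not in masks:
--             order.append(path)
--         masks[path] = path.split(sep)
--
--     # work items: ('call', phase, members, start, end) or ('mask', members, idx)
--     stack = [('call', 'end', list(order), 0, -1)]
--     while stack:
--         item = stack.pop()
--         if item[0] == 'mask':
--             _, members, idx = item
--             for key in members:
--                 masks[key][idx] = None
--             continue
--         _, phase, members, start, end = item
--         groups = {}
--         idx = end if phase == 'end' else start
--         for key in members:
--             groups.setdefault(masks[key][idx], []).append(key)
--         pushes = []
--         for group in groups.values():
--             if phase == 'end' or len(groups) > 1:
--                 pushes.append(('mask', group, idx))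
--             if len(group) > 1:
--                 if phase == 'end':
--                     pushes.append(('call', 'start', group, start, end - 1))
--                 else:
--                     pushes.append(('call', 'end', group, start + 1, end))
--         stack.extend(reversed(pushes))
--
--     result = {}
--     for original in order:
--         kept = []
--         for ps, ms in zip(original.split(sep), masks[original]):
--             if ms is None:
--                 kept.append(ps)
--             elif not kept or kept[-1] != ellipsis:
--                 kept.append(ellipsis)
--         result[original] = sep.join(kept)
--     return result
-- ===== Notes on version B (the rewrite author's own statement) =====
-- stated objective: alternative
-- what changed: The mutual recursion _do_end/_do_start is replaced by a single iterative driver that pops 'call' and 'mask' work items off an explicit LIFO stack, grouping by the window edge per phase and pushing each group's mask and sub-call items; the recursion disappears entirely.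
import Mathlib
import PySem

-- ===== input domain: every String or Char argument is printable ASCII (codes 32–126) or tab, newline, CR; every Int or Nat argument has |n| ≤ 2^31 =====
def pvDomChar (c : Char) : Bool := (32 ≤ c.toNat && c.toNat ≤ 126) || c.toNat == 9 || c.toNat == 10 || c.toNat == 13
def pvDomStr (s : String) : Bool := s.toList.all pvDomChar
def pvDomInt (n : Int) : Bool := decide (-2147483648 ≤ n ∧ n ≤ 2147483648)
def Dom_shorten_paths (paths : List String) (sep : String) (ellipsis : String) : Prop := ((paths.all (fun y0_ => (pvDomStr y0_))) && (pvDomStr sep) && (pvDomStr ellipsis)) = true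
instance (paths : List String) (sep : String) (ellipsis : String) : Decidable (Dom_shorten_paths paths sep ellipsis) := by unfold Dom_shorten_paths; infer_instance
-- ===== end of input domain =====

-- B replaces A's mutual recursion (_do_end/_do_start) by a single iterative driver over an
-- explicit LIFO work stack of 'call'/'mask' items (objective: alternative decomposition, same cost).
-- Both ports carry a fuel/window guard that only makes the recursion total; it never fires on
-- inputs admitted by Pre_. A mutates its dict values in place; the equivalence proved here is
-- about the RETURN value only.

-- ===== shared helpers (identical subroutines of both Pythons: split/dedup, group build, mask, rejoin) =====

-- path.split(sep); sep = "" (where Python raises ValueError) is excluded by Pre_ below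
def pvSplit (sep p : String) : List String := (PySem.Str.split? p sep).getD [p]

-- keys of the dict comprehension {path: ... for path in paths}: first-occurrence order, deduped
def pvKeys (paths : List String) : List String :=
  paths.foldl (fun acc p => if p ∈ acc then acc else acc ++ [p]) []

-- state: one mask list per deduped path (Python's aliased dict values), member id = position
-- path[idx] = None  (list assignment with Python index rules; out of range = no-op, unreachable where Python returns)
def pvSetNone (m : List (Option String)) (idx : Int) : List (Option String) :=
  let n : Int := (m.length : Int)
  let j : Int := if idx < 0 then idx + n else idx
  if 0 ≤ j ∧ j < n then m.set j.toNat none else m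

def pvMaskAll (σ : List (List (Option String))) (g : List Nat) (idx : Int) :
    List (List (Option String)) :=
  g.foldl (fun σ i => σ.set i (pvSetNone (σ.getD i []) idx)) σ

-- path[idx] read; none = IndexError (Python crashes there; excluded by Pre_)
def pvRead (σ : List (List (Option String))) (i : Nat) (idx : Int) : Option (Option String) :=
  PySem.List.pyGet? (σ.getD i []) idx

-- groups.setdefault(key, []).append(path): insertion-ordered association list
def pvAddToGroup (gs : List (Option (Option String) × List Nat)) (key : Option (Option String))
    (i : Nat) : List (Option (Option String) × List Nat) :=
  match gs with
  | [] => [(key, [i])]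
  | (k, g) :: rest => if k = key then (k, g ++ [i]) :: rest else (k, g) :: pvAddToGroup rest key i

def pvGroups (σ : List (List (Option String))) (members : List Nat) (idx : Int) :
    List (Option (Option String) × List Nat) :=
  members.foldl (fun gs i => pvAddToGroup gs (pvRead σ i idx) i) []

-- the final reconstruction loop: None = keep segment, else collapse into one ellipsis
def pvRejoin (ell : String) (acc : List String) :
    List (String × Option String) → List String
  | [] => acc
  | (ps, ms) :: rest =>
    match ms with
    | none => pvRejoin ell (acc ++ [ps]) rest
    | some _ =>
      if acc.getLast? = some ell then pvRejoin ell acc rest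
      else pvRejoin ell (acc ++ [ell]) rest

-- deduped keys, initial state, and the depth fuel 2·maxLen+8 (the recursion window s-e grows
-- by one per nested call, and whenever the Python returns every reached call has
-- s + (-1-e) ≤ 2·maxLen, so the fuel never runs out on admitted inputs)
def pvInit (paths : List String) (sep : String) :
    List String × List (List (Option String)) × Nat :=
  let keys := pvKeys paths
  let σ0 := keys.map (fun p => (pvSplit sep p).map some)
  let maxLen : Nat := σ0.foldl (fun a m => max a m.length) 0
  (keys, σ0, 2 * maxLen + 8)

def pvFinishGo (sep ell : String) (σ : List (List (Option String))) :
    List String → Nat → List (String × String)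
  | [], _ => []
  | p :: rest, i =>
    (p, PySem.Str.join sep (pvRejoin ell [] ((pvSplit sep p).zip (σ.getD i [])))) ::
      pvFinishGo sep ell σ rest (i + 1)

-- ===== PORT A =====  (_do_end / _do_start: ph = true is the end phase; one fuel unit per call)

def pvDoGroupsF
    (rec_ : Bool → List Nat → Int → Int → List (List (Option String)) → List (List (Option String)))
    (ph : Bool) (n : Nat) :
    List (Option (Option String) × List Nat) → Int → Int →
      List (List (Option String)) → List (List (Option String))
  | [], _, _, σ => σ
  | (_, g) :: rest, s, e, σ =>
    let σ1 := if ph then pvMaskAll σ g e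
              else if 1 < n then pvMaskAll σ g s else σ
    let σ2 := if g.length = 1 then σ1
              else if ph then rec_ false g s (e - 1) σ1
              else rec_ true g (s + 1) e σ1
    pvDoGroupsF rec_ ph n rest s e σ2

def pvDoCallF : Nat → Bool → List Nat → Int → Int →
    List (List (Option String)) → List (List (Option String))
  | 0, _, _, _, _, σ => σ
  | f + 1, ph, members, s, e, σ =>
    let gs := pvGroups σ members (if ph then e else s)
    pvDoGroupsF (pvDoCallF f) ph gs.length gs s e σ

def shorten_paths (paths : List String) (sep : String) (ellipsis : String) :
    List (String × String) :=
  let init := pvInit paths sep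
  let σf := pvDoCallF init.2.2 true (List.range init.1.length) 0 (-1) init.2.1
  pvFinishGo sep ellipsis σf init.1 0

-- ===== PORT B =====  (explicit work stack of call/mask items, popped LIFO)

inductive PVItem where
  | call : Bool → List Nat → Int → Int → PVItem
  | mask : List Nat → Int → PVItem
deriving DecidableEq, Repr

def pvPushes (ph : Bool) (n : Nat) (s e : Int)
    (gs : List (Option (Option String) × List Nat)) : List PVItem :=
  gs.flatMap (fun g =>
    (if ph then [PVItem.mask g.2 e]
     else if 1 < n then [PVItem.mask g.2 s] else []) ++
    (if g.2.length = 1 then []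
     else if ph then [PVItem.call false g.2 s (e - 1)]
     else [PVItem.call true g.2 (s + 1) e]))

-- iteration budget for the stack loop (an over-count of the items it can ever process;
-- the loop stops on the empty stack long before it is spent)
def pvWeight (b : Int) : PVItem → Nat
  | .mask _ _ => 1
  | .call _ members s e => (members.length + 1) * 3 ^ ((b + 1 - (s - e)).toNat)

def pvWSum (b : Int) (stack : List PVItem) : Nat := (stack.map (pvWeight b)).sum

def pvRunF (b : Int) : Nat → List (List (Option String)) → List PVItem →
    List (List (Option String))
  | 0, σ, _ => σ
  | _ + 1, σ, [] => σ
  | f + 1, σ, .mask g idx :: k => pvRunF b f (pvMaskAll σ g idx) k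
  | f + 1, σ, .call ph members s e :: k =>
    if b < s - e then pvRunF b f σ k
    else
      let gs := pvGroups σ members (if ph then e else s)
      pvRunF b f σ (pvPushes ph gs.length s e gs ++ k)

def shorten_paths_alt (paths : List String) (sep : String) (ellipsis : String) :
    List (String × String) :=
  let init := pvInit paths sep
  let stack0 := [PVItem.call true (List.range init.1.length) 0 (-1)]
  let σf := pvRunF (init.2.2 : Int) (pvWSum (init.2.2 : Int) stack0) init.2.1 stack0
  pvFinishGo sep ellipsis σf init.1 0

-- ===== PRECONDITION & SPEC =====

-- A raises IndexError exactly when the split lists contain a 'crash pair' — an even-length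
-- split p whose first half is one constant segment together with q = p[0] :: p — that no third
-- path 'rescues' by disagreeing with p at an early-enough start read (which masks that start
-- position and makes the pair diverge before p's indices are exhausted).
def pvCrashPair (p q : List String) : Bool :=
  match p with
  | [] => false
  | x :: _ =>
    q == x :: p && p.length % 2 == 0 &&
      (List.range (p.length / 2)).all (fun u => p.getD u "" == x)

def pvRescuer (r p : List String) : Bool :=
  (List.range ((p.length - 2) / 2 + 1)).any (fun u =>
    ((List.range (u + 1)).all (fun t =>
        decide (t + 1 ≤ r.length) &&
          r.getD (r.length - 1 - t) "" == p.getD (p.length - 1 - t) "")) &&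
    ((List.range u).all (fun uu =>
        decide (2 * uu + 1 < r.length) && r.getD uu "" == p.getD uu "")) &&
    (decide (r.length ≤ 2 * u + 1) || r.getD u "" != p.getD u ""))

def pvCrashes (paths : List String) (sep : String) : Bool :=
  let ss := paths.map (pvSplit sep)
  ss.any (fun p => ss.any (fun q =>
    pvCrashPair p q && !(ss.any (fun r => r ≠ p && r ≠ q && pvRescuer r p))))

-- Pre_ excludes exactly the inputs on which the Python A raises: sep = "" with a non-empty
-- paths list (ValueError from str.split; with no paths A never splits and returns {}) and the
-- IndexError inputs characterized by pvCrashes above; on every other input A returns normally.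
def Pre_shorten_paths (paths : List String) (sep : String) (ellipsis : String) : Prop :=
  (paths = [] ∨ sep ≠ "") ∧ pvCrashes paths sep = false

instance (paths : List String) (sep : String) (ellipsis : String) :
    Decidable (Pre_shorten_paths paths sep ellipsis) := by
  unfold Pre_shorten_paths; infer_instance

def pvWitness_shorten_paths : List String × String × String :=
  (["a/b", "c/b"], "/", ".")

def Spec_shorten_paths (paths : List String) (sep : String) (ellipsis : String)
    (out : List (String × String)) : Prop := out = shorten_paths_alt paths sep ellipsis

instance (paths : List String) (sep : String) (ellipsis : String)
    (out : List (String × String)) : Decidable (Spec_shorten_paths paths sep ellipsis out) := by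
  unfold Spec_shorten_paths; infer_instance

-- ===== CLAIM (what is proved, stated in full; the proofs are below) =====
def Claim_equal_shorten_paths : Prop := ∀ (paths : List String) (sep : String) (ellipsis : String), Dom_shorten_paths paths sep ellipsis → Pre_shorten_paths paths sep ellipsis → Spec_shorten_paths paths sep ellipsis (shorten_paths paths sep ellipsis)

-- ===== LEMMAS AND PROOFS =====

theorem pvWeight_pos (b : Int) (it : PVItem) : 1 ≤ pvWeight b it := by
  cases it with
  | mask g idx => simp [pvWeight]
  | call ph m s e =>
    show 0 < pvWeight b (PVItem.call ph m s e)
    rw [pvWeight]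
    exact Nat.mul_pos (Nat.succ_pos m.length) (Nat.pow_pos (by norm_num))

def pvGSize (gs : List (Option (Option String) × List Nat)) : Nat :=
  (gs.map (fun g => g.2.length)).sum

theorem pvGSize_add (gs : List (Option (Option String) × List Nat)) (key : Option (Option String))
    (i : Nat) : pvGSize (pvAddToGroup gs key i) = pvGSize gs + 1 := by
  induction gs with
  | nil => simp [pvAddToGroup, pvGSize]
  | cons hd tl ih =>
    obtain ⟨k, g⟩ := hd
    by_cases h : k = key <;> simp [pvAddToGroup, h, pvGSize] at ih ⊢ <;> omega

theorem pvLen_add (gs : List (Option (Option String) × List Nat)) (key : Option (Option String))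
    (i : Nat) : (pvAddToGroup gs key i).length ≤ gs.length + 1 := by
  induction gs with
  | nil => simp [pvAddToGroup]
  | cons hd tl ih =>
    obtain ⟨k, g⟩ := hd
    by_cases h : k = key <;> simp [pvAddToGroup, h] <;> omega

theorem pvGroups_size_aux (σ : List (List (Option String))) (idx : Int) :
    ∀ (members : List Nat) (gs0 : List (Option (Option String) × List Nat)),
      pvGSize (members.foldl (fun gs i => pvAddToGroup gs (pvRead σ i idx) i) gs0)
        = pvGSize gs0 + members.length := by
  intro members
  induction members with
  | nil => intro gs0; simp
  | cons m ms ih =>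
    intro gs0
    simp only [List.foldl_cons, List.length_cons]
    rw [ih (pvAddToGroup gs0 (pvRead σ m idx) m), pvGSize_add]
    omega

theorem pvGroups_len_aux (σ : List (List (Option String))) (idx : Int) :
    ∀ (members : List Nat) (gs0 : List (Option (Option String) × List Nat)),
      gs0.length ≤ pvGSize gs0 →
      (members.foldl (fun gs i => pvAddToGroup gs (pvRead σ i idx) i) gs0).length
        ≤ pvGSize (members.foldl (fun gs i => pvAddToGroup gs (pvRead σ i idx) i) gs0) := by
  intro members
  induction members with
  | nil => intro gs0 h; simpa using h
  | cons m ms ih =>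
    intro gs0 h
    simp only [List.foldl_cons]
    refine ih (pvAddToGroup gs0 (pvRead σ m idx) m) ?_
    have h1 := pvGSize_add gs0 (pvRead σ m idx) m
    have h2 := pvLen_add gs0 (pvRead σ m idx) m
    omega

theorem pvGroups_size (σ : List (List (Option String))) (members : List Nat) (idx : Int) :
    pvGSize (pvGroups σ members idx) = members.length := by
  have := pvGroups_size_aux σ idx members []
  simpa [pvGroups, pvGSize] using this

theorem pvGroups_len_le (σ : List (List (Option String))) (members : List Nat) (idx : Int) :
    (pvGroups σ members idx).length ≤ pvGSize (pvGroups σ members idx) := by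
  have := pvGroups_len_aux σ idx members [] (by simp [pvGSize])
  simpa [pvGroups] using this

theorem pvWSum_append (b : Int) (xs ys : List PVItem) :
    pvWSum b (xs ++ ys) = pvWSum b xs + pvWSum b ys := by
  simp [pvWSum]

theorem pvPushes_le (b : Int) (ph : Bool) (n : Nat) (s e : Int)
    (gs : List (Option (Option String) × List Nat)) (hb : s - e ≤ b) :
    pvWSum b (pvPushes ph n s e gs)
      ≤ gs.length + (pvGSize gs + gs.length) * 3 ^ ((b - (s - e)).toNat) := by
  induction gs with
  | nil => simp [pvPushes, pvWSum]
  | cons hd tl ih =>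
    set m := 3 ^ ((b - (s - e)).toNat) with hm
    have hmask : pvWSum b (if ph then [PVItem.mask hd.2 e]
        else if 1 < n then [PVItem.mask hd.2 s] else []) ≤ 1 := by
      split_ifs <;> simp [pvWSum, pvWeight]
    have hcall : pvWSum b (if hd.2.length = 1 then []
        else if ph then [PVItem.call false hd.2 s (e - 1)]
        else [PVItem.call true hd.2 (s + 1) e]) ≤ (hd.2.length + 1) * m := by
      have e1 : (b + 1 - (s - (e - 1))).toNat = (b - (s - e)).toNat := by omega
      have e2 : (b + 1 - ((s + 1) - e)).toNat = (b - (s - e)).toNat := by omega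
      split_ifs <;> simp [pvWSum, pvWeight, e1, e2, hm]
    have step : pvPushes ph n s e (hd :: tl)
        = ((if ph then [PVItem.mask hd.2 e]
            else if 1 < n then [PVItem.mask hd.2 s] else [])
          ++ (if hd.2.length = 1 then []
            else if ph then [PVItem.call false hd.2 s (e - 1)]
            else [PVItem.call true hd.2 (s + 1) e]))
          ++ pvPushes ph n s e tl := by
      simp [pvPushes]
    rw [step, pvWSum_append, pvWSum_append]
    have hgoal : (1 : Nat) + (hd.2.length + 1) * m
        + (tl.length + (pvGSize tl + tl.length) * m)
        = (tl.length + 1) + ((pvGSize tl + hd.2.length) + (tl.length + 1)) * m := by ring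
    have hsz : pvGSize (hd :: tl) = hd.2.length + pvGSize tl := by simp [pvGSize]
    simp only [hsz, List.length_cons]
    calc _ ≤ 1 + (hd.2.length + 1) * m + (tl.length + (pvGSize tl + tl.length) * m) := by
              omega
      _ = (tl.length + 1) + ((pvGSize tl + hd.2.length) + (tl.length + 1)) * m := hgoal
      _ ≤ _ := by
        have hco : pvGSize tl + hd.2.length = hd.2.length + pvGSize tl := by omega
        rw [hco]

theorem pvPushes_wsum_lt (b : Int) (ph : Bool) (σ : List (List (Option String)))
    (members : List Nat) (s e idx : Int) (hb : s - e ≤ b) :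
    pvWSum b (pvPushes ph (pvGroups σ members idx).length s e (pvGroups σ members idx))
      < pvWeight b (PVItem.call ph members s e) := by
  set gs := pvGroups σ members idx with hgs
  have hS : pvGSize gs = members.length := pvGroups_size σ members idx
  have hn : gs.length ≤ pvGSize gs := pvGroups_len_le σ members idx
  have hle := pvPushes_le b ph gs.length s e gs hb
  set m := 3 ^ ((b - (s - e)).toNat) with hm
  have hm1 : 1 ≤ m := Nat.one_le_pow _ _ (by norm_num)
  have hx : (b + 1 - (s - e)).toNat = (b - (s - e)).toNat + 1 := by omega
  have hw : pvWeight b (PVItem.call ph members s e) = (members.length + 1) * (m * 3) := by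
    simp [pvWeight, hx, pow_succ, hm]
  rw [hw]
  have hSm : pvGSize gs ≤ pvGSize gs * m := Nat.le_mul_of_pos_right _ (by omega)
  have h2 : gs.length + (pvGSize gs + gs.length) * m ≤ pvGSize gs + 2 * (pvGSize gs * m) := by
    have : (pvGSize gs + gs.length) * m ≤ (pvGSize gs + pvGSize gs) * m :=
      Nat.mul_le_mul_right _ (by omega)
    nlinarith
  have h3 : pvGSize gs + 2 * (pvGSize gs * m) < (pvGSize gs + 1) * (m * 3) := by nlinarith
  rw [← hS]
  omega

-- the A-side denotation of a stack: each call item run with its window fuel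
def pvStep (b : Int) (σ : List (List (Option String))) : PVItem → List (List (Option String))
  | .mask g idx => pvMaskAll σ g idx
  | .call ph m s e => pvDoCallF (b + 1 - (s - e)).toNat ph m s e σ

def pvDen (b : Int) (σ : List (List (Option String))) (stack : List PVItem) :
    List (List (Option String)) :=
  stack.foldl (pvStep b) σ

theorem pvDen_cons (b : Int) (σ : List (List (Option String))) (it : PVItem)
    (k : List PVItem) : pvDen b σ (it :: k) = pvDen b (pvStep b σ it) k := rfl

theorem pvDen_groups (b : Int) (ph : Bool) (n : Nat) (s e : Int) (wf : Nat)
    (h1 : (b + 1 - (s - (e - 1))).toNat = wf) (h2 : (b + 1 - ((s + 1) - e)).toNat = wf) :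
    ∀ (gs : List (Option (Option String) × List Nat)) (σ : List (List (Option String)))
      (k : List PVItem),
      pvDen b σ (pvPushes ph n s e gs ++ k)
        = pvDen b (pvDoGroupsF (pvDoCallF wf) ph n gs s e σ) k := by
  intro gs
  induction gs with
  | nil => intro σ k; simp [pvPushes, pvDoGroupsF]
  | cons hd tl ih =>
    intro σ k
    obtain ⟨key, g⟩ := hd
    rw [pvDoGroupsF]
    cases ph with
    | true =>
      have hpush : pvPushes true n s e ((key, g) :: tl)
          = PVItem.mask g e :: ((if g.length = 1 then []
              else [PVItem.call false g s (e - 1)]) ++ pvPushes true n s e tl) := by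
        simp [pvPushes]
      rw [hpush, List.cons_append, pvDen_cons]
      by_cases hlen : g.length = 1
      · simpa [hlen, pvStep] using ih (pvMaskAll σ g e) k
      · simp only [hlen, if_false, List.singleton_append, List.cons_append, List.nil_append]
        rw [pvDen_cons]
        simpa [hlen, pvStep, h1] using
          ih (pvDoCallF wf false g s (e - 1) (pvMaskAll σ g e)) k
    | false =>
      by_cases hn : 1 < n
      · have hpush : pvPushes false n s e ((key, g) :: tl)
            = PVItem.mask g s :: ((if g.length = 1 then []
                else [PVItem.call true g (s + 1) e]) ++ pvPushes false n s e tl) := by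
          simp [pvPushes, hn]
        rw [hpush, List.cons_append, pvDen_cons]
        by_cases hlen : g.length = 1
        · simpa [hlen, hn, pvStep] using ih (pvMaskAll σ g s) k
        · simp only [hlen, if_false, List.singleton_append, List.cons_append, List.nil_append]
          rw [pvDen_cons]
          simpa [hlen, hn, pvStep, h2] using
            ih (pvDoCallF wf true g (s + 1) e (pvMaskAll σ g s)) k
      · have hpush : pvPushes false n s e ((key, g) :: tl)
            = (if g.length = 1 then []
                else [PVItem.call true g (s + 1) e]) ++ pvPushes false n s e tl := by
          simp [pvPushes, hn]
        rw [hpush]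
        by_cases hlen : g.length = 1
        · simpa [hlen, hn] using ih σ k
        · simp only [hlen, if_false, List.singleton_append, List.cons_append,
            List.nil_append, List.append_assoc]
          rw [pvDen_cons]
          simpa [hlen, hn, pvStep, h2] using ih (pvDoCallF wf true g (s + 1) e σ) k

theorem pvRunF_den (b : Int) :
    ∀ (f : Nat) (σ : List (List (Option String))) (stack : List PVItem),
      pvWSum b stack ≤ f → pvRunF b f σ stack = pvDen b σ stack := by
  intro f
  induction f with
  | zero =>
    intro σ stack h
    cases stack with
    | nil => rfl
    | cons it k =>
      exfalso
      have h1 := pvWeight_pos b it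
      have : pvWSum b (it :: k) = pvWeight b it + pvWSum b k := by simp [pvWSum]
      omega
  | succ f ih =>
    intro σ stack h
    cases stack with
    | nil => rfl
    | cons it k =>
      have hsum : pvWSum b (it :: k) = pvWeight b it + pvWSum b k := by simp [pvWSum]
      cases it with
      | mask g idx =>
        rw [pvRunF, pvDen_cons]
        exact ih (pvMaskAll σ g idx) k (by simp [pvWeight] at hsum; omega)
      | call ph members s e =>
        have hk : pvWSum b k ≤ f := by
          have := pvWeight_pos b (PVItem.call ph members s e); omega
        by_cases hg : b < s - e
        · rw [pvRunF]
          simp only [hg, if_true]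
          rw [pvDen_cons]
          have hz : (b + 1 - (s - e)).toNat = 0 := by omega
          rw [ih σ k hk]
          simp [pvStep, hz, pvDoCallF]
        · rw [pvRunF]
          simp only [hg, if_false]
          have hlt := pvPushes_wsum_lt b ph σ members s e (if ph then e else s) (by omega)
          have hle : pvWSum b
              (pvPushes ph (pvGroups σ members (if ph then e else s)).length s e
                (pvGroups σ members (if ph then e else s)) ++ k) ≤ f := by
            rw [pvWSum_append]; omega
          rw [ih σ _ hle]
          have hwf : (b + 1 - (s - e)).toNat = ((b + 1 - (s - e)).toNat - 1) + 1 := by omega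
          have h1 : (b + 1 - (s - (e - 1))).toNat = (b + 1 - (s - e)).toNat - 1 := by omega
          have h2 : (b + 1 - ((s + 1) - e)).toNat = (b + 1 - (s - e)).toNat - 1 := by omega
          have hstep : pvStep b σ (PVItem.call ph members s e)
              = pvDoGroupsF (pvDoCallF ((b + 1 - (s - e)).toNat - 1)) ph
                  (pvGroups σ members (if ph then e else s)).length
                  (pvGroups σ members (if ph then e else s)) s e σ := by
            rw [pvStep, hwf, pvDoCallF]
            simp
          rw [pvDen_groups b ph _ s e _ h1 h2, pvDen_cons, hstep]

-- ===== VERDICT (by name: the statement is the Claim_ definition above) =====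
theorem shorten_paths_spec : Claim_equal_shorten_paths := by
  intro paths sep ellipsis _ _
  unfold Spec_shorten_paths
  show shorten_paths paths sep ellipsis = shorten_paths_alt paths sep ellipsis
  simp only [shorten_paths, shorten_paths_alt]
  have h := pvRunF_den ((pvInit paths sep).2.2 : Int)
    (pvWSum ((pvInit paths sep).2.2 : Int)
      [PVItem.call true (List.range (pvInit paths sep).1.length) 0 (-1)])
    (pvInit paths sep).2.1
    [PVItem.call true (List.range (pvInit paths sep).1.length) 0 (-1)] le_rfl
  have hz : ((((pvInit paths sep).2.2 : Int)) + 1 - ((0 : Int) - (-1))).toNat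
      = (pvInit paths sep).2.2 := by omega
  rw [h]
  simp only [pvDen, List.foldl_cons, List.foldl_nil, pvStep, hz]
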